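-- pv_equiv track=rewrite | github.com/worldwidelaw/legal-sources | sources/VU/VFSC-Enforcement/bootstrap.py | _classify_notice
-- ===== SOURCE A (Python) =====
-- from typing import Generator, Optional, Any
--
-- SKIP_KEYWORDS = [
--     "application form", "vacancy", "job ", "employment",
--     "annual report", "strategic plan", "template",
-- ]
--
-- def _classify_notice(title: str, url: str) -> Optional[str]:
--     """Classify a notice by title/URL. Returns category or None to skip."""
--     t = title.lower()
--     u = url.lower()
--
--     # Skip non-enforcement content
--     if any(kw in t for kw in SKIP_KEYWORDS):
--         return None
--
--     if "revocation" in t or "revoke" in t: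
--         return "revocation"
--     if "intention to revoke" in t:
--         return "intention_to_revoke"
--     if "warning" in t or "advisory" in t:
--         return "warning"
--     if "fraud" in t:
--         return "fraud"
--     if "liquidation" in t:
--         return "liquidation"
--     if "notice" in t or "public" in t:
--         return "public_notice"
--     if "removal" in t or "striking" in t or "struck" in t:
--         return "removal"
--
--     # Check URL for clues
--     if "revoc" in u:
--         return "revocation"
--     if "warning" in u or "advisory" in u:
--         return "warning"
--     if "fraud" in u:
--         return "fraud"
--     if "liquidat" in u:
--         return "liquidation"
--     if "notice" in u:
--         return "public_notice"
--
--     # If it's a PDF on the public notices page, include it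
--     if u.endswith(".pdf"):
--         return "public_notice"
--
--     return None
-- ===== SOURCE B (Python) =====
-- from typing import Optional
--
-- # Ordered rule table; index = priority.  ("t", pat, cat): title contains pat;
-- # ("u", pat, cat): url contains pat; ("e", pat, cat): url endswith pat.
-- # cat None = skip.  Skip rules first, then title rules, then url rules, then pdf.
-- _RULES = [
--     ("t", "application form", None),
--     ("t", "vacancy", None),
--     ("t", "job ", None),
--     ("t", "employment", None),
--     ("t", "annual report", None),
--     ("t", "strategic plan", None),
--     ("t", "template", None),
--     ("t", "revocation", "revocation"),
--     ("t", "revoke", "revocation"),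
--     ("t", "intention to revoke", "intention_to_revoke"),
--     ("t", "warning", "warning"),
--     ("t", "advisory", "warning"),
--     ("t", "fraud", "fraud"),
--     ("t", "liquidation", "liquidation"),
--     ("t", "notice", "public_notice"),
--     ("t", "public", "public_notice"),
--     ("t", "removal", "removal"),
--     ("t", "striking", "removal"),
--     ("t", "struck", "removal"),
--     ("u", "revoc", "revocation"),
--     ("u", "warning", "warning"),
--     ("u", "advisory", "warning"),
--     ("u", "fraud", "fraud"),
--     ("u", "liquidat", "liquidation"),
--     ("u", "notice", "public_notice"),
--     ("e", ".pdf", "public_notice"),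
-- ]
--
-- def _classify_notice(title: str, url: str) -> Optional[str]:
--     """Exhaustively collect EVERY matching rule, then return the category of the
--     highest-priority (lowest-index) hit.  No short-circuiting: all rules are
--     evaluated; precedence is resolved afterwards by arg-min over the hit set.
--     Indices are distinct, so min never compares the categories themselves."""
--     t = title.lower()
--     u = url.lower()
--     hits = [(i, cat) for i, (field, pat, cat) in enumerate(_RULES)
--             if (u.endswith(pat) if field == "e"
--                 else pat in (t if field == "t" else u))]
--     return min(hits)[1] if hits else None
-- ===== Notes on version B (the rewrite author's own statement) =====
-- stated objective: alternative
-- what changed: Instead of an ordered short-circuit if-chain, B exhaustively evaluates all 26 (field, pattern, category) rules, collects every matching rule's index, and resolves precedence afterwards by taking the minimum-index hit (arg-min over the match set).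
import Mathlib
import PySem

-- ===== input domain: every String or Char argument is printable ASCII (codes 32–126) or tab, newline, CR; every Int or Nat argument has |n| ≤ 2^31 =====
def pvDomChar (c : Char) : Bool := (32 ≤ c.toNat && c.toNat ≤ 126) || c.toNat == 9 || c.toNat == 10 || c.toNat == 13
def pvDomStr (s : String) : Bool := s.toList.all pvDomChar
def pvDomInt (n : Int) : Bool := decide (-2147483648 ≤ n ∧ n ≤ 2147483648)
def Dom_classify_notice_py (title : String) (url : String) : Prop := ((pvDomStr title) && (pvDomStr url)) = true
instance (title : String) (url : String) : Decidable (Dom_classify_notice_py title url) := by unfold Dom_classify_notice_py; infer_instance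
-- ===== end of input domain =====

-- B replaces A's ordered short-circuit if-chain by exhaustive evaluation of all 26
-- (field, pattern, category) rules followed by arg-min over the hit indices (objective: alternative).


-- ===== PORT A =====
def SKIP_KEYWORDS : List String :=
  ["application form", "vacancy", "job ", "employment",
   "annual report", "strategic plan", "template"]

def classify_notice_py (title : String) (url : String) : Option String :=
  let t := PySem.Str.lower title
  let u := PySem.Str.lower url
  if SKIP_KEYWORDS.any (fun kw => PySem.Str.isIn kw t) then none
  else if PySem.Str.isIn "revocation" t || PySem.Str.isIn "revoke" t then some "revocation"
  else if PySem.Str.isIn "intention to revoke" t then some "intention_to_revoke"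
  else if PySem.Str.isIn "warning" t || PySem.Str.isIn "advisory" t then some "warning"
  else if PySem.Str.isIn "fraud" t then some "fraud"
  else if PySem.Str.isIn "liquidation" t then some "liquidation"
  else if PySem.Str.isIn "notice" t || PySem.Str.isIn "public" t then some "public_notice"
  else if PySem.Str.isIn "removal" t || PySem.Str.isIn "striking" t || PySem.Str.isIn "struck" t then some "removal"
  else if PySem.Str.isIn "revoc" u then some "revocation"
  else if PySem.Str.isIn "warning" u || PySem.Str.isIn "advisory" u then some "warning"
  else if PySem.Str.isIn "fraud" u then some "fraud"
  else if PySem.Str.isIn "liquidat" u then some "liquidation"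
  else if PySem.Str.isIn "notice" u then some "public_notice"
  else if PySem.Str.endswith u ".pdf" then some "public_notice"
  else none

-- ===== PORT B =====
-- the ordered rule table of Source B (index = priority)
def pvRules : List (String × String × Option String) :=
  [("t", "application form", none),
   ("t", "vacancy", none),
   ("t", "job ", none),
   ("t", "employment", none),
   ("t", "annual report", none),
   ("t", "strategic plan", none),
   ("t", "template", none),
   ("t", "revocation", some "revocation"),
   ("t", "revoke", some "revocation"),
   ("t", "intention to revoke", some "intention_to_revoke"),
   ("t", "warning", some "warning"),
   ("t", "advisory", some "warning"),
   ("t", "fraud", some "fraud"),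
   ("t", "liquidation", some "liquidation"),
   ("t", "notice", some "public_notice"),
   ("t", "public", some "public_notice"),
   ("t", "removal", some "removal"),
   ("t", "striking", some "removal"),
   ("t", "struck", some "removal"),
   ("u", "revoc", some "revocation"),
   ("u", "warning", some "warning"),
   ("u", "advisory", some "warning"),
   ("u", "fraud", some "fraud"),
   ("u", "liquidat", some "liquidation"),
   ("u", "notice", some "public_notice"),
   ("e", ".pdf", some "public_notice")]

-- the rule predicate of Source B's comprehension
def pvHit (t u : String) (r : String × String × Option String) : Bool :=
  if r.1 == "e" then PySem.Str.endswith u r.2.1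
  else PySem.Str.isIn r.2.1 (if r.1 == "t" then t else u)

-- Source B: hits = [(i, cat) ...]; min(hits)[1] if hits else None.
-- Python's min on the (index, cat) tuples compares indices first; indices are
-- pairwise distinct so the categories are never compared — ported as a fold
-- keeping the pair with the strictly smaller index.
def classify_notice_py_alt (title : String) (url : String) : Option String :=
  let t := PySem.Str.lower title
  let u := PySem.Str.lower url
  let hits := ((PySem.List.enumerate pvRules).filter (fun p => pvHit t u p.2)).map
      (fun p => (p.1, p.2.2.2))
  match hits with
  | [] => none
  | h :: rest => (rest.foldl (fun b x => if x.1 < b.1 then x else b) h).2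

-- ===== PRECONDITION & SPEC =====
def Spec_classify_notice_py (title : String) (url : String) (out : Option String) : Prop := out = classify_notice_py_alt title url
instance (title : String) (url : String) (out : Option String) : Decidable (Spec_classify_notice_py title url out) := by unfold Spec_classify_notice_py; infer_instance

-- ===== CLAIM (what is proved, stated in full; the proofs are below) =====
def Claim_equal_classify_notice_py : Prop := ∀ (title : String) (url : String), Dom_classify_notice_py title url → Spec_classify_notice_py title url (classify_notice_py title url)

-- ===== LEMMAS AND PROOFS =====

-- proof-only helper: first-match over a rule list
def pvFirst (t u : String) : List (String × String × Option String) → Option String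
  | [] => none
  | r :: rs => if pvHit t u r then r.2.2 else pvFirst t u rs

-- a fold looking for a strictly smaller index keeps its accumulator when none exists
theorem pvFoldKeep (l : List (Int × Option String)) (b : Int × Option String)
    (hb : ∀ x ∈ l, ¬ x.1 < b.1) :
    l.foldl (fun b x => if x.1 < b.1 then x else b) b = b := by
  induction l with
  | nil => rfl
  | cons x xs ih =>
    simp only [List.foldl_cons]
    rw [if_neg (hb x (List.mem_cons_self))]
    exact ih (fun y hy => hb y (List.mem_cons_of_mem _ hy))

-- every index in the enumeration from s is ≥ s
theorem pvEnumGe {α : Type} (rs : List α) (s : Int) :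
    ∀ p ∈ PySem.List.enumerate rs s, s ≤ p.1 := by
  induction rs generalizing s with
  | nil => simp [PySem.List.enumerate_nil]
  | cons r rs ih =>
    intro p hp
    rw [PySem.List.enumerate_cons] at hp
    rcases List.mem_cons.mp hp with h | h
    · simp [h]
    · have := ih (s + 1) p h; omega

-- B's collect-all-then-arg-min equals first-match, for any rule list
theorem pvMinEqFirst (t u : String) (rs : List (String × String × Option String)) (s : Int) :
    (match ((PySem.List.enumerate rs s).filter (fun p => pvHit t u p.2)).map
        (fun p => (p.1, p.2.2.2)) with
     | [] => (none : Option String)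
     | h :: rest => (rest.foldl (fun b x => if x.1 < b.1 then x else b) h).2)
    = pvFirst t u rs := by
  induction rs generalizing s with
  | nil => simp [PySem.List.enumerate_nil, pvFirst]
  | cons r rs ih =>
    rw [PySem.List.enumerate_cons]
    by_cases h : pvHit t u r = true
    · simp only [List.filter_cons, h, if_pos trivial, List.map_cons, pvFirst, if_pos h]
      rw [pvFoldKeep]
      intro x hx
      rcases List.mem_map.mp hx with ⟨p, hp, rfl⟩
      have := pvEnumGe rs (s + 1) p (List.mem_filter.mp hp).1
      simp; omega
    · simp only [List.filter_cons, h, Bool.false_eq_true, if_false, pvFirst]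
      exact ih (s + 1)

theorem pvAltEqFirst (title url : String) :
    classify_notice_py_alt title url
      = pvFirst (PySem.Str.lower title) (PySem.Str.lower url) pvRules := by
  unfold classify_notice_py_alt
  exact pvMinEqFirst _ _ pvRules 0

-- first-match on the concrete rule table equals A's if-chain
set_option maxHeartbeats 2000000 in
theorem pvFirstEqA (title url : String) :
    classify_notice_py title url
      = pvFirst (PySem.Str.lower title) (PySem.Str.lower url) pvRules := by
  unfold classify_notice_py pvRules SKIP_KEYWORDS
  simp only [pvFirst, pvHit, String.reduceBEq, Bool.false_eq_true, if_false,
    eq_self_iff_true, if_true, List.any_cons, List.any_nil, Bool.or_false]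
  all_goals rcases Bool.eq_false_or_eq_true (PySem.Str.isIn "application form" (PySem.Str.lower title)) with h|h <;>
    simp only [h, Bool.true_or, Bool.false_or, Bool.false_eq_true, if_false, eq_self_iff_true, if_true]
  all_goals rcases Bool.eq_false_or_eq_true (PySem.Str.isIn "vacancy" (PySem.Str.lower title)) with h|h <;>
    simp only [h, Bool.true_or, Bool.false_or, Bool.false_eq_true, if_false, eq_self_iff_true, if_true]
  all_goals rcases Bool.eq_false_or_eq_true (PySem.Str.isIn "job " (PySem.Str.lower title)) with h|h <;>
    simp only [h, Bool.true_or, Bool.false_or, Bool.false_eq_true, if_false, eq_self_iff_true, if_true]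
  all_goals rcases Bool.eq_false_or_eq_true (PySem.Str.isIn "employment" (PySem.Str.lower title)) with h|h <;>
    simp only [h, Bool.true_or, Bool.false_or, Bool.false_eq_true, if_false, eq_self_iff_true, if_true]
  all_goals rcases Bool.eq_false_or_eq_true (PySem.Str.isIn "annual report" (PySem.Str.lower title)) with h|h <;>
    simp only [h, Bool.true_or, Bool.false_or, Bool.false_eq_true, if_false, eq_self_iff_true, if_true]
  all_goals rcases Bool.eq_false_or_eq_true (PySem.Str.isIn "strategic plan" (PySem.Str.lower title)) with h|h <;>
    simp only [h, Bool.true_or, Bool.false_or, Bool.false_eq_true, if_false, eq_self_iff_true, if_true]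
  all_goals rcases Bool.eq_false_or_eq_true (PySem.Str.isIn "template" (PySem.Str.lower title)) with h|h <;>
    simp only [h, Bool.true_or, Bool.false_or, Bool.false_eq_true, if_false, eq_self_iff_true, if_true]
  all_goals rcases Bool.eq_false_or_eq_true (PySem.Str.isIn "revocation" (PySem.Str.lower title)) with h|h <;>
    simp only [h, Bool.true_or, Bool.false_or, Bool.false_eq_true, if_false, eq_self_iff_true, if_true]
  all_goals rcases Bool.eq_false_or_eq_true (PySem.Str.isIn "revoke" (PySem.Str.lower title)) with h|h <;>
    simp only [h, Bool.true_or, Bool.false_or, Bool.false_eq_true, if_false, eq_self_iff_true, if_true]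
  all_goals rcases Bool.eq_false_or_eq_true (PySem.Str.isIn "warning" (PySem.Str.lower title)) with h|h <;>
    simp only [h, Bool.true_or, Bool.false_or, Bool.false_eq_true, if_false, eq_self_iff_true, if_true]
  all_goals rcases Bool.eq_false_or_eq_true (PySem.Str.isIn "advisory" (PySem.Str.lower title)) with h|h <;>
    simp only [h, Bool.true_or, Bool.false_or, Bool.false_eq_true, if_false, eq_self_iff_true, if_true]
  all_goals rcases Bool.eq_false_or_eq_true (PySem.Str.isIn "fraud" (PySem.Str.lower title)) with h|h <;>
    simp only [h, Bool.true_or, Bool.false_or, Bool.false_eq_true, if_false, eq_self_iff_true, if_true]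
  all_goals rcases Bool.eq_false_or_eq_true (PySem.Str.isIn "liquidation" (PySem.Str.lower title)) with h|h <;>
    simp only [h, Bool.true_or, Bool.false_or, Bool.false_eq_true, if_false, eq_self_iff_true, if_true]
  all_goals rcases Bool.eq_false_or_eq_true (PySem.Str.isIn "notice" (PySem.Str.lower title)) with h|h <;>
    simp only [h, Bool.true_or, Bool.false_or, Bool.false_eq_true, if_false, eq_self_iff_true, if_true]
  all_goals rcases Bool.eq_false_or_eq_true (PySem.Str.isIn "public" (PySem.Str.lower title)) with h|h <;>
    simp only [h, Bool.true_or, Bool.false_or, Bool.false_eq_true, if_false, eq_self_iff_true, if_true]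
  all_goals rcases Bool.eq_false_or_eq_true (PySem.Str.isIn "removal" (PySem.Str.lower title)) with h|h <;>
    simp only [h, Bool.true_or, Bool.false_or, Bool.false_eq_true, if_false, eq_self_iff_true, if_true]
  all_goals rcases Bool.eq_false_or_eq_true (PySem.Str.isIn "striking" (PySem.Str.lower title)) with h|h <;>
    simp only [h, Bool.true_or, Bool.false_or, Bool.false_eq_true, if_false, eq_self_iff_true, if_true]
  all_goals rcases Bool.eq_false_or_eq_true (PySem.Str.isIn "struck" (PySem.Str.lower title)) with h|h <;>
    simp only [h, Bool.true_or, Bool.false_or, Bool.false_eq_true, if_false, eq_self_iff_true, if_true]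
  all_goals rcases Bool.eq_false_or_eq_true (PySem.Str.isIn "warning" (PySem.Str.lower url)) with h|h <;>
    simp only [h, Bool.true_or, Bool.false_or, Bool.false_eq_true, if_false, eq_self_iff_true, if_true]

-- ===== VERDICT (by name: the statement is the Claim_ definition above) =====
theorem classify_notice_py_spec : Claim_equal_classify_notice_py := by
  intro title url _
  unfold Spec_classify_notice_py
  rw [pvAltEqFirst, pvFirstEqA]
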